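-- pv_equiv track=rewrite | github.com/jeremyrrose/team-binary-algo-practice | index.py | five_inserter_two
-- ===== SOURCE A (Python) =====
-- def five_inserter_two (original):
--
--     found = None
--     string = ''
--
--     # loop through an ordered array of the digits
--     # add a 5 and change found if n <= 5
--     for n in str(original):
--         if not found and int(n) <= 5:
--             string += f'5{n}'
--             found = True
--         else:
--             string += n
--
--     if not found:
--         string += '5'
--
--     return int(string)
-- ===== SOURCE B (Python) =====
-- def five_inserter_two(original):
--     s = str(original)
--     idx = next((i for i, c in enumerate(s) if int(c) <= 5), len(s))
--     return int(s[:idx] + '5' + s[idx:])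
-- ===== Notes on version B (the rewrite author's own statement) =====
-- stated objective: simpler
-- what changed: Replaces A's char-by-char accumulator loop with a boolean 'found' flag by locating the insertion index first (first digit <= 5, defaulting to the end) and splicing '5' in with string slicing.
import Mathlib
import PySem

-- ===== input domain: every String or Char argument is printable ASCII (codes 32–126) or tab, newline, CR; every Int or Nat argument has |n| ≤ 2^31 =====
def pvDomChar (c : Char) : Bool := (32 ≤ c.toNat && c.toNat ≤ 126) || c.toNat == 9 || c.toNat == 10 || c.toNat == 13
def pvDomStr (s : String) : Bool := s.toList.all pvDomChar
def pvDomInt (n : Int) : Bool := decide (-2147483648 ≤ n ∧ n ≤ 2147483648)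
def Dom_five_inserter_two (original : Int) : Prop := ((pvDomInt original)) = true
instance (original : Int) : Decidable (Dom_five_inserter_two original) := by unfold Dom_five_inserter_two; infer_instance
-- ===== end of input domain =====

-- B replaces A's accumulator loop + 'found' flag by find-the-index-then-splice (simpler decomposition, same cost).

-- ===== PORT A =====
-- int(n) of a single char, as Python: PySem.Int.ofStr?; the none case (non-digit char,
-- Python raises ValueError) is excluded by Pre_; the .getD 6 default is never reached inside Pre_.
def fiDigit (c : Char) : Int := (PySem.Int.ofStr? (String.mk [c])).getD 6

-- the for-loop of A: state (found, string)
def fiA_go (found : Bool) (acc : List Char) : List Char → Bool × List Char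
  | [] => (found, acc)
  | c :: cs =>
    if !found && decide (fiDigit c ≤ 5) then
      fiA_go true (acc ++ ['5', c]) cs
    else
      fiA_go found (acc ++ [c]) cs

def five_inserter_two (original : Int) : Int :=
  let s := (PySem.Int.toStr original).toList
  let r := fiA_go false [] s
  let str := if !r.1 then r.2 ++ ['5'] else r.2
  (PySem.Int.ofStr? (String.mk str)).getD 0

-- ===== PORT B =====
def five_inserter_two_alt (original : Int) : Int :=
  let s := (PySem.Int.toStr original).toList
  let idx := (s.findIdx? (fun c => decide (fiDigit c ≤ 5))).getD s.length
  (PySem.Int.ofStr? (String.mk (s.take idx ++ ['5'] ++ s.drop idx))).getD 0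

-- ===== PRECONDITION & SPEC =====
-- Pre_ excludes negative inputs, on which both Pythons raise ValueError (int('-')).
def Pre_five_inserter_two (original : Int) : Prop := 0 ≤ original
instance (original : Int) : Decidable (Pre_five_inserter_two original) := by unfold Pre_five_inserter_two; infer_instance
def pvWitness_five_inserter_two : Int := (906)
def Spec_five_inserter_two (original : Int) (out : Int) : Prop := out = five_inserter_two_alt original
instance (original : Int) (out : Int) : Decidable (Spec_five_inserter_two original out) := by unfold Spec_five_inserter_two; infer_instance

-- ===== CLAIM (what is proved, stated in full; the proofs are below) =====
def Claim_equal_five_inserter_two : Prop := ∀ (original : Int), Dom_five_inserter_two original → Pre_five_inserter_two original → Spec_five_inserter_two original (five_inserter_two original)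

-- ===== LEMMAS AND PROOFS =====

-- once found, A's loop just appends the rest
theorem fiA_go_found (cs : List Char) : ∀ (acc : List Char), fiA_go true acc cs = (true, acc ++ cs) := by
  induction cs with
  | nil => intro acc; simp [fiA_go]
  | cons c cs ih => intro acc; simp [fiA_go, ih]

-- A's loop + final fixup equals B's splice, for any char list
theorem fiA_go_splice (cs : List Char) : ∀ (acc : List Char),
    (let r := fiA_go false acc cs; if !r.1 then r.2 ++ ['5'] else r.2) =
    acc ++ (let i := (cs.findIdx? (fun c => decide (fiDigit c ≤ 5))).getD cs.length;
            cs.take i ++ ['5'] ++ cs.drop i) := by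
  induction cs with
  | nil => intro acc; simp [fiA_go]
  | cons c cs ih =>
    intro acc
    by_cases h : fiDigit c ≤ 5
    · simp [fiA_go, h, fiA_go_found, List.findIdx?_cons]
    · have := ih (acc ++ [c])
      simp only [fiA_go, h, decide_false, Bool.and_false, Bool.not_false] at this ⊢
      simp only [List.findIdx?_cons, h, decide_false, List.append_assoc]
      cases hf : cs.findIdx? (fun c => decide (fiDigit c ≤ 5)) with
      | none => rw [hf] at this; simpa using this
      | some i => rw [hf] at this; simpa using this

-- ===== VERDICT (by name: the statement is the Claim_ definition above) =====
theorem five_inserter_two_spec : Claim_equal_five_inserter_two := by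
  intro original _ _
  unfold Spec_five_inserter_two five_inserter_two five_inserter_two_alt
  have := fiA_go_splice ((PySem.Int.toStr original).toList) []
  simp only [List.nil_append] at this
  simp only [this]
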